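-- pv_equiv track=rewrite | github.com/pypi-data/pypi-mirror-403 | packages/cnaclib/cnaclib-0.1.30-py3-none-any.whl/cnaclib/rac.py | Cal_NumPeriode
-- ===== SOURCE A (Python) =====
-- def Cal_NumPeriode(dpc):
--     '''
--     Renvoi un dictionnaire qui comporte le numero de la période de prise en charge (de 1 a 4) ainsi que les numéros des mois (de 1 a dpc)
--     qui appartienne a chaque periode.
--
--     Parameters
--     ----------
--     dpc : int.
--     La durée de prise en charge.
--
--     Returns
--     -------
--     Un dictionnaire {Numero periode : Numero mois}.
--     '''
--     NumMois = [x for x in range(1, (dpc) + 1)]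
--     if (dpc/4) - int((dpc/4)) ==0.0:
--         NumPeriode = []
--         z = int((dpc)/4)
--         for m in NumMois:
--             if m <= z :
--                 NumPeriode.append("P1")
--             elif (m > z and m <= z * 2):
--                 NumPeriode.append("P2")
--             elif (m > z * 2 and m <= z * 3):
--                 NumPeriode.append("P3")
--             else:
--                 NumPeriode.append("P4")
--         #MoisPeriode = {NumMois[x]: NumPeriode[x] for x in range(len (NumMois))}
--     elif (dpc/4) - int((dpc/4)) ==0.25:
--         NumPeriode = []
--         z = int((dpc)/4)
--         for m in NumMois:
--             if m < z+1 :
--                 NumPeriode.append("P1")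
--             elif m == z+1:
--                 NumPeriode.append("P1-P2")
--             elif (m > (z + 1) and m < (z * 2)+1):
--                 NumPeriode.append("P2")
--             elif m == ((z * 2)+1):
--                 NumPeriode.append("P2-P3")
--             elif (m > z * 2 and m < (z * 3)+1):
--                 NumPeriode.append("P3")
--             elif (m == (z * 3)+1):
--                 NumPeriode.append("P3-P4")
--             else:
--                 NumPeriode.append("P4")
--         #MoisPeriode = {NumMois[x]: NumPeriode[x] for x in range(len (NumMois))}
--     elif (dpc/4) - int((dpc/4)) == 0.5:
--         NumPeriode = []
--         z = int((dpc)/4)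
--         for m in NumMois:
--             if m < z+1 :
--                 NumPeriode.append("P1")
--             elif m == z+1:
--                 NumPeriode.append("P1-P2")
--             elif (m > z+1 and m < (z * 2)+2):
--                 NumPeriode.append("P2")
--             elif m == ((z * 2)+2):
--                 NumPeriode.append("P2-P3")
--             elif (m > (z * 2)+2 and m <= (z * 3)+2):
--                 NumPeriode.append("P3")
--             else:
--                 NumPeriode.append("P4")
--
--     elif (dpc/4) - int((dpc/4)) == 0.75:
--         NumPeriode = []
--         z = int((dpc)/4)
--         for m in NumMois:
--             if m < z+1 :
--                 NumPeriode.append("P1")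
--             elif m == z+1:
--                 NumPeriode.append("P1-P2")
--             elif (m > z+1 and m < (z * 2)+2):
--                 NumPeriode.append("P2")
--             elif m == ((z * 2)+2):
--                 NumPeriode.append("P2-P3")
--             elif (m > (z * 2)+2 and m < (z * 3)+3):
--                 NumPeriode.append("P3")
--             elif (m == (z * 3)+3):
--                 NumPeriode.append("P3-P4")
--             else:
--                 NumPeriode.append("P4")
--     MoisPeriode = {NumMois[x]: NumPeriode[x] for x in range(len (NumMois))}
--     return MoisPeriode
-- ===== SOURCE B (Python) =====
-- def Cal_NumPeriode(dpc):
--     '''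
--     Same mapping {month: care-period label}, built by direct segment
--     construction instead of a per-month if-chain.
--     '''
--     z, r = dpc // 4, dpc % 4
--     if r == 0:
--         labels = ["P1"] * z + ["P2"] * z + ["P3"] * z + ["P4"] * z
--     elif r == 1:
--         labels = (["P1"] * z + ["P1-P2"] + ["P2"] * (z - 1) + ["P2-P3"]
--                   + ["P3"] * (z - 1) + ["P3-P4"] + ["P4"] * z)
--     elif r == 2:
--         labels = (["P1"] * z + ["P1-P2"] + ["P2"] * z + ["P2-P3"]
--                   + ["P3"] * z + ["P4"] * z)
--     else:
--         labels = (["P1"] * z + ["P1-P2"] + ["P2"] * z + ["P2-P3"]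
--                   + ["P3"] * z + ["P3-P4"] + ["P4"] * z)
--     return {m: lab for m, lab in zip(range(1, dpc + 1), labels)}
-- ===== Notes on version B (the rewrite author's own statement) =====
-- stated objective: alternative
-- what changed: B computes the quarter length z and the remainder r once with integer floor-division and builds the whole label sequence as a concatenation of list-multiplied segment blocks zipped with the month range, instead of A's float fractional-part dispatch plus a per-month if/elif chain and an index-driven dict comprehension.
import Mathlib
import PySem

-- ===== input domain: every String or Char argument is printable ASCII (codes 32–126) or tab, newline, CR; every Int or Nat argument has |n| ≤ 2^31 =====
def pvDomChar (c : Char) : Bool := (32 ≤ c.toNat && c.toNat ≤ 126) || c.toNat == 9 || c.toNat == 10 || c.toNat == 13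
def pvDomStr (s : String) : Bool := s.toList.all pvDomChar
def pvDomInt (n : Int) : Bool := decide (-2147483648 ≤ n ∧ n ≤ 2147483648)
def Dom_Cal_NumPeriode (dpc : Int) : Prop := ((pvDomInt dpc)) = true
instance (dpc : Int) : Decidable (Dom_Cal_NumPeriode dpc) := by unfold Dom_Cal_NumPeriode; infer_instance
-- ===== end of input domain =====

-- B rebuilds the month→period dictionary by direct segment construction (list-multiplied blocks
-- zipped with the month range) instead of A's per-month if/elif chain: objective 'alternative'.

-- ===== PORT A =====
-- The Python float test `(dpc/4) - int(dpc/4) == q` (q = 0.0, 0.25, 0.5, 0.75) is rendered exactly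
-- over Int as `dpc - 4 * int(dpc/4) = 4*q`: for |dpc| ≤ 2^31 < 2^53 both dpc/4 and int(dpc/4) are
-- exact doubles, and int(dpc/4) truncates toward zero = PySem.Int.truncdiv dpc 4.
-- When no branch matches (possible only for dpc < 0) Python leaves NumPeriode unbound, but the final
-- dict comprehension is then empty and never reads it; the port uses [] there, which is equivalent.
def Cal_NumPeriode (dpc : Int) : List (Int × String) :=
  let NumMois : List Int := PySem.List.pyRange 1 (dpc + 1) 1
  let NumPeriode : List String :=
    if dpc - 4 * PySem.Int.truncdiv dpc 4 = 0 then
      let z : Int := PySem.Int.truncdiv dpc 4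
      NumMois.foldl (fun acc m =>
        if m ≤ z then acc ++ ["P1"]
        else if m > z ∧ m ≤ z * 2 then acc ++ ["P2"]
        else if m > z * 2 ∧ m ≤ z * 3 then acc ++ ["P3"]
        else acc ++ ["P4"]) []
    else if dpc - 4 * PySem.Int.truncdiv dpc 4 = 1 then
      let z : Int := PySem.Int.truncdiv dpc 4
      NumMois.foldl (fun acc m =>
        if m < z + 1 then acc ++ ["P1"]
        else if m = z + 1 then acc ++ ["P1-P2"]
        else if m > z + 1 ∧ m < z * 2 + 1 then acc ++ ["P2"]
        else if m = z * 2 + 1 then acc ++ ["P2-P3"]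
        else if m > z * 2 ∧ m < z * 3 + 1 then acc ++ ["P3"]
        else if m = z * 3 + 1 then acc ++ ["P3-P4"]
        else acc ++ ["P4"]) []
    else if dpc - 4 * PySem.Int.truncdiv dpc 4 = 2 then
      let z : Int := PySem.Int.truncdiv dpc 4
      NumMois.foldl (fun acc m =>
        if m < z + 1 then acc ++ ["P1"]
        else if m = z + 1 then acc ++ ["P1-P2"]
        else if m > z + 1 ∧ m < z * 2 + 2 then acc ++ ["P2"]
        else if m = z * 2 + 2 then acc ++ ["P2-P3"]
        else if m > z * 2 + 2 ∧ m ≤ z * 3 + 2 then acc ++ ["P3"]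
        else acc ++ ["P4"]) []
    else if dpc - 4 * PySem.Int.truncdiv dpc 4 = 3 then
      let z : Int := PySem.Int.truncdiv dpc 4
      NumMois.foldl (fun acc m =>
        if m < z + 1 then acc ++ ["P1"]
        else if m = z + 1 then acc ++ ["P1-P2"]
        else if m > z + 1 ∧ m < z * 2 + 2 then acc ++ ["P2"]
        else if m = z * 2 + 2 then acc ++ ["P2-P3"]
        else if m > z * 2 + 2 ∧ m < z * 3 + 3 then acc ++ ["P3"]
        else if m = z * 3 + 3 then acc ++ ["P3-P4"]
        else acc ++ ["P4"]) []
    else []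
  (((PySem.List.pyRange 0 (NumMois.length : Int) 1)).foldl
    (fun d x => d.insert (PySem.List.pyGetD NumMois x 0) (PySem.List.pyGetD NumPeriode x ""))
    PySem.Dict.empty).items

-- ===== PORT B =====
def Cal_NumPeriode_alt (dpc : Int) : List (Int × String) :=
  let z : Int := PySem.Int.floordiv dpc 4
  let r : Int := PySem.Int.mod dpc 4
  let labels : List String :=
    if r = 0 then
      PySem.List.pyRepeat ["P1"] z ++ PySem.List.pyRepeat ["P2"] z ++
      PySem.List.pyRepeat ["P3"] z ++ PySem.List.pyRepeat ["P4"] z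
    else if r = 1 then
      PySem.List.pyRepeat ["P1"] z ++ ["P1-P2"] ++ PySem.List.pyRepeat ["P2"] (z - 1) ++ ["P2-P3"] ++
      PySem.List.pyRepeat ["P3"] (z - 1) ++ ["P3-P4"] ++ PySem.List.pyRepeat ["P4"] z
    else if r = 2 then
      PySem.List.pyRepeat ["P1"] z ++ ["P1-P2"] ++ PySem.List.pyRepeat ["P2"] z ++ ["P2-P3"] ++
      PySem.List.pyRepeat ["P3"] z ++ PySem.List.pyRepeat ["P4"] z
    else
      PySem.List.pyRepeat ["P1"] z ++ ["P1-P2"] ++ PySem.List.pyRepeat ["P2"] z ++ ["P2-P3"] ++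
      PySem.List.pyRepeat ["P3"] z ++ ["P3-P4"] ++ PySem.List.pyRepeat ["P4"] z
  (((PySem.List.pyRange 1 (dpc + 1) 1).zip labels).foldl
    (fun d p => d.insert p.1 p.2) PySem.Dict.empty).items

-- ===== PRECONDITION & SPEC =====
def Spec_Cal_NumPeriode (dpc : Int) (out : List (Int × String)) : Prop := out = Cal_NumPeriode_alt dpc
instance (dpc : Int) (out : List (Int × String)) : Decidable (Spec_Cal_NumPeriode dpc out) := by unfold Spec_Cal_NumPeriode; infer_instance

-- ===== CLAIM (what is proved, stated in full; the proofs are below) =====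
def Claim_equal_Cal_NumPeriode : Prop := ∀ (dpc : Int), Dom_Cal_NumPeriode dpc → Spec_Cal_NumPeriode dpc (Cal_NumPeriode dpc)

-- ===== LEMMAS AND PROOFS =====

-- the per-month label chains of A's four loops, as plain functions (used only by the proofs)
def fA0 (z m : Int) : String :=
  if m ≤ z then "P1" else if m > z ∧ m ≤ z * 2 then "P2"
  else if m > z * 2 ∧ m ≤ z * 3 then "P3" else "P4"
def fA1 (z m : Int) : String :=
  if m < z + 1 then "P1" else if m = z + 1 then "P1-P2"
  else if m > z + 1 ∧ m < z * 2 + 1 then "P2" else if m = z * 2 + 1 then "P2-P3"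
  else if m > z * 2 ∧ m < z * 3 + 1 then "P3" else if m = z * 3 + 1 then "P3-P4" else "P4"
def fA2 (z m : Int) : String :=
  if m < z + 1 then "P1" else if m = z + 1 then "P1-P2"
  else if m > z + 1 ∧ m < z * 2 + 2 then "P2" else if m = z * 2 + 2 then "P2-P3"
  else if m > z * 2 + 2 ∧ m ≤ z * 3 + 2 then "P3" else "P4"
def fA3 (z m : Int) : String :=
  if m < z + 1 then "P1" else if m = z + 1 then "P1-P2"
  else if m > z + 1 ∧ m < z * 2 + 2 then "P2" else if m = z * 2 + 2 then "P2-P3"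
  else if m > z * 2 + 2 ∧ m < z * 3 + 3 then "P3" else if m = z * 3 + 3 then "P3-P4" else "P4"

-- A's index-driven dict comprehension is the fold over the zipped pairs
theorem idx_fold_eq_zip (xs : List Int) (ys : List String) (h : ys.length = xs.length) :
    (PySem.List.pyRange 0 (xs.length : Int) 1).foldl
      (fun d x => d.insert (PySem.List.pyGetD xs x 0) (PySem.List.pyGetD ys x ""))
      PySem.Dict.empty
    = (xs.zip ys).foldl (fun d p => d.insert p.1 p.2) PySem.Dict.empty := by
  have hzip : xs.zip ys
      = (List.range xs.length).map (fun (k : Nat) => (PySem.List.pyGetD xs (k : Int) 0, PySem.List.pyGetD ys (k : Int) "")) := by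
    apply List.ext_getElem
    · simp [h]
    · intro k h1 h2
      have hk : k < xs.length := by simp [h] at h1; omega
      simp only [List.getElem_zip, List.getElem_map, List.getElem_range]
      rw [PySem.List.pyGetD_natCast, PySem.List.pyGetD_natCast,
        List.getD_eq_getElem _ _ hk, List.getD_eq_getElem _ _ (by omega)]
  rw [hzip, List.foldl_map, PySem.List.pyRange_zero]
  simp only [Int.toNat_natCast, List.foldl_map]

theorem fold_eq_map0 (z : Int) (l : List Int) :
    l.foldl (fun acc m =>
      if m ≤ z then acc ++ ["P1"]
      else if m > z ∧ m ≤ z * 2 then acc ++ ["P2"]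
      else if m > z * 2 ∧ m ≤ z * 3 then acc ++ ["P3"]
      else acc ++ ["P4"]) [] = l.map (fA0 z) := by
  have h := PySem.List.foldl_append_singleton_eq_map (fA0 z) l ([] : List String)
  rw [List.nil_append] at h
  rw [← h]
  apply PySem.List.foldl_congr_mem
  intro acc x _
  simp only [fA0]
  split_ifs <;> rfl

theorem fold_eq_map1 (z : Int) (l : List Int) :
    l.foldl (fun acc m =>
      if m < z + 1 then acc ++ ["P1"]
      else if m = z + 1 then acc ++ ["P1-P2"]
      else if m > z + 1 ∧ m < z * 2 + 1 then acc ++ ["P2"]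
      else if m = z * 2 + 1 then acc ++ ["P2-P3"]
      else if m > z * 2 ∧ m < z * 3 + 1 then acc ++ ["P3"]
      else if m = z * 3 + 1 then acc ++ ["P3-P4"]
      else acc ++ ["P4"]) [] = l.map (fA1 z) := by
  have h := PySem.List.foldl_append_singleton_eq_map (fA1 z) l ([] : List String)
  rw [List.nil_append] at h
  rw [← h]
  apply PySem.List.foldl_congr_mem
  intro acc x _
  simp only [fA1]
  split_ifs <;> rfl

theorem fold_eq_map2 (z : Int) (l : List Int) :
    l.foldl (fun acc m =>
      if m < z + 1 then acc ++ ["P1"]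
      else if m = z + 1 then acc ++ ["P1-P2"]
      else if m > z + 1 ∧ m < z * 2 + 2 then acc ++ ["P2"]
      else if m = z * 2 + 2 then acc ++ ["P2-P3"]
      else if m > z * 2 + 2 ∧ m ≤ z * 3 + 2 then acc ++ ["P3"]
      else acc ++ ["P4"]) [] = l.map (fA2 z) := by
  have h := PySem.List.foldl_append_singleton_eq_map (fA2 z) l ([] : List String)
  rw [List.nil_append] at h
  rw [← h]
  apply PySem.List.foldl_congr_mem
  intro acc x _
  simp only [fA2]
  split_ifs <;> rfl

theorem fold_eq_map3 (z : Int) (l : List Int) :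
    l.foldl (fun acc m =>
      if m < z + 1 then acc ++ ["P1"]
      else if m = z + 1 then acc ++ ["P1-P2"]
      else if m > z + 1 ∧ m < z * 2 + 2 then acc ++ ["P2"]
      else if m = z * 2 + 2 then acc ++ ["P2-P3"]
      else if m > z * 2 + 2 ∧ m < z * 3 + 3 then acc ++ ["P3"]
      else if m = z * 3 + 3 then acc ++ ["P3-P4"]
      else acc ++ ["P4"]) [] = l.map (fA3 z) := by
  have h := PySem.List.foldl_append_singleton_eq_map (fA3 z) l ([] : List String)
  rw [List.nil_append] at h
  rw [← h]
  apply PySem.List.foldl_congr_mem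
  intro acc x _
  simp only [fA3]
  split_ifs <;> rfl

-- segment characterisation of each label chain, for z ≥ 1
theorem map_blocks0 (z : Int) (hz : 1 ≤ z) :
    (PySem.List.pyRange 1 (4 * z + 0 + 1) 1).map (fA0 z) =
      List.replicate z.toNat "P1" ++ List.replicate z.toNat "P2" ++
      List.replicate z.toNat "P3" ++ List.replicate z.toNat "P4" := by
  apply List.ext_getElem
  · simp [PySem.List.pyRange_one]
    omega
  · intro k h1 h2
    simp only [PySem.List.pyRange_one, List.getElem_map, List.getElem_range,
      List.getElem_append, List.getElem_replicate, List.getElem_singleton,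
      List.length_replicate, List.length_append, List.length_cons, List.length_nil]
    simp only [List.length_map, List.length_append, List.length_replicate, List.length_cons,
      List.length_nil, PySem.List.pyRange_one, List.length_range] at h1 h2
    simp only [fA0]
    split_ifs <;> first | rfl | omega

theorem map_blocks1 (z : Int) (hz : 1 ≤ z) :
    (PySem.List.pyRange 1 (4 * z + 1 + 1) 1).map (fA1 z) =
      List.replicate z.toNat "P1" ++ ["P1-P2"] ++ List.replicate (z - 1).toNat "P2" ++ ["P2-P3"] ++
      List.replicate (z - 1).toNat "P3" ++ ["P3-P4"] ++ List.replicate z.toNat "P4" := by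
  apply List.ext_getElem
  · simp [PySem.List.pyRange_one]
    omega
  · intro k h1 h2
    simp only [PySem.List.pyRange_one, List.getElem_map, List.getElem_range,
      List.getElem_append, List.getElem_replicate, List.getElem_singleton,
      List.length_replicate, List.length_append, List.length_cons, List.length_nil]
    simp only [List.length_map, List.length_append, List.length_replicate, List.length_cons,
      List.length_nil, PySem.List.pyRange_one, List.length_range] at h1 h2
    simp only [fA1]
    split_ifs <;> first | rfl | omega

theorem map_blocks2 (z : Int) (hz : 1 ≤ z) :
    (PySem.List.pyRange 1 (4 * z + 2 + 1) 1).map (fA2 z) =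
      List.replicate z.toNat "P1" ++ ["P1-P2"] ++ List.replicate z.toNat "P2" ++ ["P2-P3"] ++
      List.replicate z.toNat "P3" ++ List.replicate z.toNat "P4" := by
  apply List.ext_getElem
  · simp [PySem.List.pyRange_one]
    omega
  · intro k h1 h2
    simp only [PySem.List.pyRange_one, List.getElem_map, List.getElem_range,
      List.getElem_append, List.getElem_replicate, List.getElem_singleton,
      List.length_replicate, List.length_append, List.length_cons, List.length_nil]
    simp only [List.length_map, List.length_append, List.length_replicate, List.length_cons,
      List.length_nil, PySem.List.pyRange_one, List.length_range] at h1 h2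
    simp only [fA2]
    split_ifs <;> first | rfl | omega

theorem map_blocks3 (z : Int) (hz : 1 ≤ z) :
    (PySem.List.pyRange 1 (4 * z + 3 + 1) 1).map (fA3 z) =
      List.replicate z.toNat "P1" ++ ["P1-P2"] ++ List.replicate z.toNat "P2" ++ ["P2-P3"] ++
      List.replicate z.toNat "P3" ++ ["P3-P4"] ++ List.replicate z.toNat "P4" := by
  apply List.ext_getElem
  · simp [PySem.List.pyRange_one]
    omega
  · intro k h1 h2
    simp only [PySem.List.pyRange_one, List.getElem_map, List.getElem_range,
      List.getElem_append, List.getElem_replicate, List.getElem_singleton,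
      List.length_replicate, List.length_append, List.length_cons, List.length_nil]
    simp only [List.length_map, List.length_append, List.length_replicate, List.length_cons,
      List.length_nil, PySem.List.pyRange_one, List.length_range] at h1 h2
    simp only [fA3]
    split_ifs <;> first | rfl | omega

theorem main_eq (dpc : Int) : Cal_NumPeriode dpc = Cal_NumPeriode_alt dpc := by
  rcases (by omega : dpc ≤ 0 ∨ 0 < dpc) with hle | hpos
  · have hm : PySem.List.pyRange 1 (dpc + 1) 1 = [] := by
      simp [PySem.List.pyRange_one]
      omega
    simp [Cal_NumPeriode, Cal_NumPeriode_alt, hm]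
  · rcases (by omega : dpc < 4 ∨ 4 ≤ dpc) with hsm | hbig
    · interval_cases dpc <;> decide
    · obtain ⟨z, r, hd, hr0, hr4, hmd⟩ :
        ∃ z r, dpc = 4 * z + r ∧ 0 ≤ r ∧ r < 4 ∧ PySem.Int.mod dpc 4 = r := by
        refine ⟨PySem.Int.floordiv dpc 4, PySem.Int.mod dpc 4, ?_,
          PySem.Int.mod_nonneg dpc (by norm_num), PySem.Int.mod_lt dpc (by norm_num), rfl⟩
        have := PySem.Int.floordiv_mul_add_mod dpc 4
        omega
      have hz1 : 1 ≤ z := by omega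
      have ht : PySem.Int.truncdiv dpc 4 = z := by
        unfold PySem.Int.truncdiv
        rw [Int.tdiv_eq_ediv_of_nonneg (by omega)]
        omega
      have hfl : PySem.Int.floordiv dpc 4 = z := by
        rw [PySem.Int.floordiv_eq_ediv_of_pos (by norm_num)]
        omega
      have : r = 0 ∨ r = 1 ∨ r = 2 ∨ r = 3 := by omega
      rcases this with h | h | h | h <;> subst h
      · simp only [Cal_NumPeriode, Cal_NumPeriode_alt, ht, hfl, hmd]
        rw [if_pos (show dpc - 4 * z = 0 by omega)]
        rw [if_pos trivial]
        rw [fold_eq_map0 z, idx_fold_eq_zip _ _ (by simp)]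
        simp only [PySem.List.pyRepeat_singleton]
        rw [show dpc + 1 = 4 * z + 0 + 1 by omega, map_blocks0 z hz1]
      · simp only [Cal_NumPeriode, Cal_NumPeriode_alt, ht, hfl, hmd]
        rw [if_neg (show ¬(dpc - 4 * z = 0) by omega)]
        rw [if_pos (show dpc - 4 * z = 1 by omega)]
        rw [if_neg (show ¬((1:Int) = 0) by omega)]
        rw [if_pos trivial]
        rw [fold_eq_map1 z, idx_fold_eq_zip _ _ (by simp)]
        simp only [PySem.List.pyRepeat_singleton]
        rw [show dpc + 1 = 4 * z + 1 + 1 by omega, map_blocks1 z hz1]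
      · simp only [Cal_NumPeriode, Cal_NumPeriode_alt, ht, hfl, hmd]
        rw [if_neg (show ¬(dpc - 4 * z = 0) by omega)]
        rw [if_neg (show ¬(dpc - 4 * z = 1) by omega)]
        rw [if_pos (show dpc - 4 * z = 2 by omega)]
        rw [if_neg (show ¬((2:Int) = 0) by omega)]
        rw [if_neg (show ¬((2:Int) = 1) by omega)]
        rw [if_pos trivial]
        rw [fold_eq_map2 z, idx_fold_eq_zip _ _ (by simp)]
        simp only [PySem.List.pyRepeat_singleton]
        rw [show dpc + 1 = 4 * z + 2 + 1 by omega, map_blocks2 z hz1]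
      · simp only [Cal_NumPeriode, Cal_NumPeriode_alt, ht, hfl, hmd]
        rw [if_neg (show ¬(dpc - 4 * z = 0) by omega)]
        rw [if_neg (show ¬(dpc - 4 * z = 1) by omega)]
        rw [if_neg (show ¬(dpc - 4 * z = 2) by omega)]
        rw [if_pos (show dpc - 4 * z = 3 by omega)]
        rw [if_neg (show ¬((3:Int) = 0) by omega)]
        rw [if_neg (show ¬((3:Int) = 1) by omega)]
        rw [if_neg (show ¬((3:Int) = 2) by omega)]
        rw [fold_eq_map3 z, idx_fold_eq_zip _ _ (by simp)]
        simp only [PySem.List.pyRepeat_singleton]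
        rw [show dpc + 1 = 4 * z + 3 + 1 by omega, map_blocks3 z hz1]

-- ===== VERDICT (by name: the statement is the Claim_ definition above) =====
theorem Cal_NumPeriode_spec : Claim_equal_Cal_NumPeriode := by
  intro dpc _
  unfold Spec_Cal_NumPeriode
  exact main_eq dpc
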